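-- pv_equiv track=rewrite | github.com/zxjsdp/NodeFinderGUI | nodefinder_gui/nodefinder_gui.py | get_tree_str
-- ===== SOURCE A (Python) =====
-- def get_tree_str(raw_tree_content):
--     """Read tree content, parse, and return tree string"""
--     tmp_tree_str = ''
--     tree_start_flag = False
--     lines = raw_tree_content.split('\n')
--     for line in lines:
--         line = line.strip()
--         if line.startswith('('):
--             tree_start_flag = True
--         if not tree_start_flag:
--             continue
--         if line.startswith('//') or line.startswith('#'):
--             break
--         else:
--             tmp_tree_str += line
--     return tmp_tree_str
-- ===== SOURCE B (Python) =====
-- def get_tree_str(raw_tree_content):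
--     """Read tree content, parse, and return tree string"""
--     lines = [l.strip() for l in raw_tree_content.split('\n')]
--     n = len(lines)
--     i = 0
--     while i < n and not lines[i].startswith('('):
--         i += 1
--     j = i
--     while j < n and not (lines[j].startswith('//') or lines[j].startswith('#')):
--         j += 1
--     return ''.join(lines[i:j])
-- ===== Notes on version B (the rewrite author's own statement) =====
-- stated objective: simpler
-- what changed: Replaces A's single stateful loop with a flag, break and string accumulation by three composed phases: strip every line, drop the prefix before the first '('-line, take lines until the first '//'/'#' comment, and join the slice.
import Mathlib
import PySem

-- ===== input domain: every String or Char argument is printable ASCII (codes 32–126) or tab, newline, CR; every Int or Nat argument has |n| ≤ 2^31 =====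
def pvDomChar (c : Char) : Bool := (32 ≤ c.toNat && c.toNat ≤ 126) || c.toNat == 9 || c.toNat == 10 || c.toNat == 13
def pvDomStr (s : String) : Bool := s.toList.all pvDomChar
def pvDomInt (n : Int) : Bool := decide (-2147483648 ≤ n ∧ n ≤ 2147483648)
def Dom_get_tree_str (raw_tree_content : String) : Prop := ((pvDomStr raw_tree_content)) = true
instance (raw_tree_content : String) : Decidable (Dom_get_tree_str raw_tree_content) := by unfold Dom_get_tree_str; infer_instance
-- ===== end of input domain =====

-- B replaces A's flag-driven accumulating loop by strip-all, scan-to-tree-start, scan-to-first-comment, join of the slice (simpler decomposition, same cost).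

-- ===== PORT A =====
-- A's for-loop with `tmp_tree_str`, `tree_start_flag` and break; strings are carried as their char lists (PySem.Chars is the exact form).
def pvLoopA : List (List Char) → List Char → Bool → List Char
  | [], acc, _ => acc
  | l :: rest, acc, flag =>
    let line := PySem.Chars.strip l
    let flag := if PySem.Chars.startswith line ['('] then true else flag
    if flag = false then pvLoopA rest acc flag
    else if PySem.Chars.startswith line ['/', '/'] || PySem.Chars.startswith line ['#'] then acc
    else pvLoopA rest (acc ++ line) flag

def get_tree_str (raw_tree_content : String) : String :=
  String.ofList (pvLoopA (PySem.Chars.splitOn raw_tree_content.toList ['\n']) [] false)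

-- ===== PORT B =====
-- first while loop of Source B: advance the index past lines not starting with '(' and slice there (= drop the prefix)
def pvDropPre : List (List Char) → List (List Char)
  | [] => []
  | l :: rest => if PySem.Chars.startswith l ['('] then l :: rest else pvDropPre rest

-- second while loop of Source B: keep lines up to the first '//' or '#' line (= take the body)
def pvTakeBody : List (List Char) → List (List Char)
  | [] => []
  | l :: rest =>
    if PySem.Chars.startswith l ['/', '/'] || PySem.Chars.startswith l ['#'] then []
    else l :: pvTakeBody rest

def get_tree_str_alt (raw_tree_content : String) : String :=
  let lines := (PySem.Chars.splitOn raw_tree_content.toList ['\n']).map PySem.Chars.strip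
  String.ofList (PySem.Chars.join [] (pvTakeBody (pvDropPre lines)))

-- ===== PRECONDITION & SPEC =====
def Spec_get_tree_str (raw_tree_content : String) (out : String) : Prop := out = get_tree_str_alt raw_tree_content
instance (raw_tree_content : String) (out : String) : Decidable (Spec_get_tree_str raw_tree_content out) := by unfold Spec_get_tree_str; infer_instance

-- ===== CLAIM (what is proved, stated in full; the proofs are below) =====
def Claim_equal_get_tree_str : Prop := ∀ (raw_tree_content : String), Dom_get_tree_str raw_tree_content → Spec_get_tree_str raw_tree_content (get_tree_str raw_tree_content)

-- ===== LEMMAS AND PROOFS =====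

theorem joinNil_cons (a : List Char) (as : List (List Char)) :
    PySem.Chars.join [] (a :: as) = a ++ PySem.Chars.join [] as := by
  cases as with
  | nil => simp [PySem.Chars.join_singleton, PySem.Chars.join_nil]
  | cons b bs => rw [PySem.Chars.join_cons_cons]; simp

theorem startswith_paren_not_comment (s : List Char)
    (h : PySem.Chars.startswith s ['('] = true) :
    PySem.Chars.startswith s ['/', '/'] = false ∧ PySem.Chars.startswith s ['#'] = false := by
  obtain ⟨t, ht⟩ := (PySem.Chars.startswith_iff s ['(']).mp h
  constructor
  · by_contra hc
    have hb : PySem.Chars.startswith s ['/', '/'] = true := by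
      cases hx : PySem.Chars.startswith s ['/', '/'] <;> simp_all
    obtain ⟨u, hu⟩ := (PySem.Chars.startswith_iff s ['/', '/']).mp hb
    rw [← ht] at hu; simp at hu
  · by_contra hc
    have hb : PySem.Chars.startswith s ['#'] = true := by
      cases hx : PySem.Chars.startswith s ['#'] <;> simp_all
    obtain ⟨u, hu⟩ := (PySem.Chars.startswith_iff s ['#']).mp hb
    rw [← ht] at hu; simp at hu

-- once the flag is true, A's loop appends exactly the lines B takes
theorem loopA_true (ls : List (List Char)) (acc : List Char) :
    pvLoopA ls acc true =
      acc ++ PySem.Chars.join [] (pvTakeBody (ls.map PySem.Chars.strip)) := by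
  induction ls generalizing acc with
  | nil => simp [pvLoopA, pvTakeBody, PySem.Chars.join_nil]
  | cons l rest ih =>
    simp only [pvLoopA, List.map_cons, pvTakeBody]
    by_cases hc : (PySem.Chars.startswith (PySem.Chars.strip l) ['/', '/']
        || PySem.Chars.startswith (PySem.Chars.strip l) ['#']) = true
    · simp [hc, PySem.Chars.join_nil]
    · simp only [ite_self, if_neg (by simp : ¬ (true = false))]
      rw [if_neg (by simp_all), if_neg (by simp_all), ih, joinNil_cons, List.append_assoc]

theorem loopA_false (ls : List (List Char)) (acc : List Char) :
    pvLoopA ls acc false =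
      acc ++ PySem.Chars.join [] (pvTakeBody (pvDropPre (ls.map PySem.Chars.strip))) := by
  induction ls generalizing acc with
  | nil => simp [pvLoopA, pvDropPre, pvTakeBody, PySem.Chars.join_nil]
  | cons l rest ih =>
    simp only [pvLoopA, List.map_cons, pvDropPre]
    by_cases hp : PySem.Chars.startswith (PySem.Chars.strip l) ['('] = true
    · obtain ⟨h1, h2⟩ := startswith_paren_not_comment _ hp
      simp only [hp, if_true, if_neg (by simp : ¬ (true = false)), h1, h2,
        Bool.or_self, pvTakeBody, if_neg (by simp : ¬ (false = true))]
      rw [loopA_true, joinNil_cons, List.append_assoc]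
    · simp only [hp]
      simpa using ih acc

-- ===== VERDICT (by name: the statement is the Claim_ definition above) =====
theorem get_tree_str_spec : Claim_equal_get_tree_str := by
  intro s _
  show get_tree_str s = get_tree_str_alt s
  unfold get_tree_str get_tree_str_alt
  rw [loopA_false]
  simp
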